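-- pv_equiv track=rewrite | github.com/dcc123456/english-spelling-game | check_syllables.py | find_split_position
-- ===== SOURCE A (Python) =====
-- from typing import List, Dict, Optional, Tuple
--
-- def find_split_position(word: str, vowel_pos: int) -> Optional[int]:
--     """
--     在元音位置后找到合适的切分点
--     音节切分规则：VCV -> V-CV, VCCV -> VC-CV
--     """
--     vowels = 'aeiou'
--
--     for i in range(vowel_pos + 1, len(word)):
--         if i + 1 < len(word) and word[i+1] in vowels:
--             if word[i] not in vowels:
--                 consonants_before_next_vowel = 0
--                 for j in range(i, len(word)):
--                     if word[j] not in vowels: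
--                         consonants_before_next_vowel += 1
--                     else:
--                         break
--
--                 if consonants_before_next_vowel >= 2:
--                     return i + 1
--                 else:
--                     return i
--
--     return None
-- ===== SOURCE B (Python) =====
-- import re
--
-- _SPLIT_PAT = re.compile('[^aeiou][aeiou]')
--
-- def find_split_position(word, vowel_pos):
--     m = _SPLIT_PAT.search(word, vowel_pos + 1)
--     return m.start() if m else None
-- ===== Notes on version B (the rewrite author's own statement) =====
-- stated objective: idiomatic
-- what changed: B replaces A's explicit scan (whose inner consonant-counting loop always counts exactly 1, making the cnt>=2 branch unreachable) by a single anchored regex search for the two-char pattern [^aeiou][aeiou].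
-- intended difference: For vowel_pos <= -2 (within A's non-raising domain) where some negative position carries a consonant-vowel bigram under Python's negative-index wraparound, A returns that negative index, while B searches from position 0 and returns the first non-negative match (or None); B's is the intended value since a split position should be a real index into the word. — e.g. on find_split_position("na", -3): A returns some (-2), B returns some 0
import Mathlib
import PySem

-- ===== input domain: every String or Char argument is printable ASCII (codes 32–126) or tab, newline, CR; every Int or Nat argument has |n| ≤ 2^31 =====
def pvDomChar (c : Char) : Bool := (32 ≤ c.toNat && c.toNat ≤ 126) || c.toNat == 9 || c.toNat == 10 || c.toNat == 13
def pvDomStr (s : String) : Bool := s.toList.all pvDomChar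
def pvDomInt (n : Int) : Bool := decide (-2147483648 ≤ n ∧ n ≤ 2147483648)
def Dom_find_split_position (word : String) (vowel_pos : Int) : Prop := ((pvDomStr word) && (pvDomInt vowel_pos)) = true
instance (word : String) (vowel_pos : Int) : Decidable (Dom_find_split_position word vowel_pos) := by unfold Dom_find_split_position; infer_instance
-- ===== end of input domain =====

-- B replaces A's scan-with-dead-inner-count by an anchored search for the consonant-vowel
-- bigram [^aeiou][aeiou] (regex in Python); on negative vowel_pos B searches from 0 instead
-- of wrapping (see D_ below).


-- ===== PORT A =====
-- vowels = 'aeiou'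
def pvVowels : List Char := ['a', 'e', 'i', 'o', 'u']

-- word[i] with Python negative-index semantics; the default is never used inside Pre_
def pvAt (cs : List Char) (i : Int) : Char := (PySem.List.pyGet? cs i).getD '?'

-- inner loop: for j in range(i, len(word)): count consonants, break at a vowel
def fsp_count (cs : List Char) : List Int → Int → Int
  | [], acc => acc
  | j :: rest, acc =>
    if pvVowels.contains (pvAt cs j) = false then fsp_count cs rest (acc + 1) else acc

-- outer loop: for i in range(vowel_pos+1, len(word)) with the early returns
def fsp_loop (cs : List Char) (n : Int) : List Int → Option Int
  | [] => none
  | i :: rest =>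
    if i + 1 < n ∧ pvVowels.contains (pvAt cs (i + 1)) = true then
      if pvVowels.contains (pvAt cs i) = false then
        let cnt := fsp_count cs (PySem.List.pyRange i n 1) 0
        if cnt ≥ 2 then some (i + 1) else some i
      else fsp_loop cs n rest
    else fsp_loop cs n rest

def find_split_position (word : String) (vowel_pos : Int) : Option Int :=
  let cs := word.toList
  fsp_loop cs (cs.length : Int) (PySem.List.pyRange (vowel_pos + 1) (cs.length : Int) 1)

-- ===== PORT B =====
-- regex search: try each start position p (clamped to ≥ 0, as re's pos argument is) in order,
-- matching the two-character pattern [^aeiou][aeiou]; first match wins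
def fsp_search (cs : List Char) : List Int → Option Int
  | [] => none
  | p :: rest =>
    if pvVowels.contains (pvAt cs p) = false ∧ pvVowels.contains (pvAt cs (p + 1)) = true then
      some p
    else fsp_search cs rest

def find_split_position_alt (word : String) (vowel_pos : Int) : Option Int :=
  let cs := word.toList
  fsp_search cs (PySem.List.pyRange (max (vowel_pos + 1) 0) ((cs.length : Int) - 1) 1)

-- ===== PRECONDITION & SPEC =====
-- Pre_ is exactly the set of inputs on which A returns (no IndexError): the scan must start
-- at index ≥ -len(word), except that start = -len(word)-1 is also safe when word[0] is not a
-- vowel (then the first iteration only reads word[-len] and skips).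
def Pre_find_split_position (word : String) (vowel_pos : Int) : Prop :=
  vowel_pos + 1 ≥ -(word.toList.length : Int) ∨
  (vowel_pos + 2 = -(word.toList.length : Int) ∧
    (['a', 'e', 'i', 'o', 'u'] : List Char).contains (word.toList.head?.getD '?') = false)
instance (word : String) (vowel_pos : Int) : Decidable (Pre_find_split_position word vowel_pos) := by
  unfold Pre_find_split_position; infer_instance

def pvWitness_find_split_position : String × Int := ("banana", 1)

-- For vowel_pos ≤ -2 where some negative position (under Python wraparound) carries a
-- consonant-vowel bigram, A returns that negative index while B searches from 0 and returns
-- the first non-negative match or none; B's is the intended value (a real index into word).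
def D_find_split_position (word : String) (vowel_pos : Int) : Prop :=
  vowel_pos ≤ -2 ∧
  ∃ i ∈ PySem.List.pyRange (max (vowel_pos + 1) (-(word.toList.length : Int))) 0 1,
    pvAt word.toList i ∉ pvVowels ∧ pvAt word.toList (i + 1) ∈ pvVowels
instance (word : String) (vowel_pos : Int) : Decidable (D_find_split_position word vowel_pos) := by
  unfold D_find_split_position; infer_instance

def Spec_find_split_position (word : String) (vowel_pos : Int) (out : Option Int) : Prop :=
  ¬ D_find_split_position word vowel_pos → out = find_split_position_alt word vowel_pos
instance (word : String) (vowel_pos : Int) (out : Option Int) : Decidable (Spec_find_split_position word vowel_pos out) := by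
  unfold Spec_find_split_position; infer_instance

def pvDiffWitness_find_split_position : String × Int := ("na", -3)
def pvDiffWitnessOut_find_split_position : (Option Int) × (Option Int) := (some (-2), some 0)

-- ===== CLAIM (what is proved, stated in full; the proofs are below) =====
def Claim_unchanged_find_split_position : Prop := ∀ (word : String) (vowel_pos : Int), Dom_find_split_position word vowel_pos → Pre_find_split_position word vowel_pos → Spec_find_split_position word vowel_pos (find_split_position word vowel_pos)
def Claim_changed_find_split_position : Prop := Dom_find_split_position (pvDiffWitness_find_split_position.1) (pvDiffWitness_find_split_position.2) ∧ Pre_find_split_position (pvDiffWitness_find_split_position.1) (pvDiffWitness_find_split_position.2) ∧ D_find_split_position (pvDiffWitness_find_split_position.1) (pvDiffWitness_find_split_position.2) ∧ find_split_position (pvDiffWitness_find_split_position.1) (pvDiffWitness_find_split_position.2) = pvDiffWitnessOut_find_split_position.1 ∧ find_split_position_alt (pvDiffWitness_find_split_position.1) (pvDiffWitness_find_split_position.2) = pvDiffWitnessOut_find_split_position.2 ∧ pvDiffWitnessOut_find_split_position.1 ≠ pvDiffWitnessOut_find_split_position.2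

def Claim_exact_find_split_position : Prop := ∀ (word : String) (vowel_pos : Int), Dom_find_split_position word vowel_pos → Pre_find_split_position word vowel_pos → D_find_split_position word vowel_pos → find_split_position word vowel_pos ≠ find_split_position_alt word vowel_pos

-- ===== LEMMAS AND PROOFS =====

-- the inner counting loop always stops at 1 when word[i] is a consonant and word[i+1] a vowel
lemma fsp_count_one (cs : List Char) (n i : Int) (hi : i < n)
    (hc : pvAt cs i ∉ pvVowels) (hv : pvAt cs (i + 1) ∈ pvVowels) :
    fsp_count cs (PySem.List.pyRange i n 1) 0 = 1 := by
  rw [PySem.List.pyRange_one_cons hi]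
  by_cases h2 : i + 1 < n
  · rw [PySem.List.pyRange_one_cons h2]
    simp [fsp_count, hc, hv]
  · rw [PySem.List.pyRange_one_eq_nil (by omega)]
    simp [fsp_count, hc]

-- from a non-negative start the two scans agree step by step
lemma fsp_main (cs : List Char) (s : Int) (hs : 0 ≤ s) :
    fsp_loop cs (cs.length : Int) (PySem.List.pyRange s (cs.length : Int) 1)
      = fsp_search cs (PySem.List.pyRange s ((cs.length : Int) - 1) 1) := by
  have H : ∀ k : Nat, ∀ s : Int, 0 ≤ s → ((cs.length : Int) - s).toNat ≤ k →
      fsp_loop cs (cs.length : Int) (PySem.List.pyRange s (cs.length : Int) 1)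
        = fsp_search cs (PySem.List.pyRange s ((cs.length : Int) - 1) 1) := by
    intro k
    induction k with
    | zero =>
      intro s hs hk
      rw [PySem.List.pyRange_one_eq_nil (by omega), PySem.List.pyRange_one_eq_nil (by omega)]
      rfl
    | succ k ih =>
      intro s hs hk
      by_cases h1 : s < (cs.length : Int)
      · rw [PySem.List.pyRange_one_cons h1]
        by_cases h2 : s + 1 < (cs.length : Int)
        · rw [PySem.List.pyRange_one_cons (show s < (cs.length : Int) - 1 by omega)]
          simp only [fsp_loop, fsp_search]
          by_cases hv : pvAt cs (s + 1) ∈ pvVowels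
          · by_cases hc : pvAt cs s ∈ pvVowels
            · rw [if_pos ⟨h2, by simpa using hv⟩, if_neg (by simpa using hc),
                if_neg (by intro h; exact absurd hc (by simpa using h.1))]
              exact ih (s + 1) (by omega) (by omega)
            · rw [if_pos ⟨h2, by simpa using hv⟩, if_pos (by simpa using hc),
                fsp_count_one cs (cs.length : Int) s h1 hc hv]
              rw [if_neg (by norm_num), if_pos ⟨by simpa using hc, by simpa using hv⟩]
          · rw [if_neg (by intro h; exact absurd (by simpa using h.2) hv),
              if_neg (by intro h; exact absurd (by simpa using h.2) hv)]
            exact ih (s + 1) (by omega) (by omega)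
        · rw [PySem.List.pyRange_one_eq_nil (show (cs.length : Int) - 1 ≤ s by omega)]
          simp only [fsp_loop, fsp_search]
          rw [if_neg (by rintro ⟨h, -⟩; omega), PySem.List.pyRange_one_eq_nil (by omega)]
          rfl
      · rw [PySem.List.pyRange_one_eq_nil (by omega), PySem.List.pyRange_one_eq_nil (by omega)]
        rfl
  exact H ((cs.length : Int) - s).toNat s hs le_rfl

-- negative positions with no consonant-vowel bigram are skipped by A's loop
lemma fsp_skip (cs : List Char) (s : Int) (hs : s ≤ 0) (hn : 1 ≤ (cs.length : Int))
    (hno : ∀ i : Int, s ≤ i → i < 0 →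
      ¬ (pvAt cs i ∉ pvVowels ∧ pvAt cs (i + 1) ∈ pvVowels)) :
    fsp_loop cs (cs.length : Int) (PySem.List.pyRange s (cs.length : Int) 1)
      = fsp_loop cs (cs.length : Int) (PySem.List.pyRange 0 (cs.length : Int) 1) := by
  have H : ∀ k : Nat, ∀ s : Int, s ≤ 0 → (-s).toNat ≤ k →
      (∀ i : Int, s ≤ i → i < 0 →
        ¬ (pvAt cs i ∉ pvVowels ∧ pvAt cs (i + 1) ∈ pvVowels)) →
      fsp_loop cs (cs.length : Int) (PySem.List.pyRange s (cs.length : Int) 1)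
        = fsp_loop cs (cs.length : Int) (PySem.List.pyRange 0 (cs.length : Int) 1) := by
    intro k
    induction k with
    | zero =>
      intro s hs hk hno
      rw [show s = 0 by omega]
    | succ k ih =>
      intro s hs hk hno
      by_cases h0 : s = 0
      · rw [h0]
      · have hlt : s < 0 := by omega
        rw [PySem.List.pyRange_one_cons (show s < (cs.length : Int) by omega)]
        simp only [fsp_loop]
        by_cases hv : pvAt cs (s + 1) ∈ pvVowels
        · have hcv : pvAt cs s ∈ pvVowels := by
            by_contra hcc
            exact hno s le_rfl hlt ⟨hcc, hv⟩
          rw [if_pos ⟨by omega, by simpa using hv⟩, if_neg (by simpa using hcv)]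
          exact ih (s + 1) (by omega) (by omega) (fun i h1 h2 => hno i (by omega) h2)
        · rw [if_neg (by intro h; exact absurd (by simpa using h.2) hv)]
          exact ih (s + 1) (by omega) (by omega) (fun i h1 h2 => hno i (by omega) h2)
  exact H (-s).toNat s hs le_rfl hno

-- whatever B's search returns is a position drawn from its candidate list
lemma fsp_search_mem (cs : List Char) : ∀ (l : List Int) (p : Int), fsp_search cs l = some p → p ∈ l := by
  intro l
  induction l with
  | nil => intro p h; simp [fsp_search] at h
  | cons a l ih =>
    intro p h
    simp only [fsp_search] at h
    split at h
    · exact (Option.some_inj.mp h) ▸ List.mem_cons_self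
    · exact List.mem_cons_of_mem _ (ih p h)

-- when some negative position carries a consonant-vowel bigram, A's loop returns a negative index
lemma fsp_loop_neg (cs : List Char) (hn : 1 ≤ (cs.length : Int)) :
    ∀ k : Nat, ∀ s : Int, s ≤ 0 → (-s).toNat ≤ k →
    (∃ i : Int, s ≤ i ∧ i < 0 ∧ pvAt cs i ∉ pvVowels ∧ pvAt cs (i + 1) ∈ pvVowels) →
    ∃ j : Int, j < 0 ∧
      fsp_loop cs (cs.length : Int) (PySem.List.pyRange s (cs.length : Int) 1) = some j := by
  intro k
  induction k with
  | zero =>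
    intro s hs hk h
    obtain ⟨i, h1, h2, -, -⟩ := h
    omega
  | succ k ih =>
    intro s hs hk h
    obtain ⟨i, h1, h2, hci, hvi⟩ := h
    have hs0 : s < 0 := by omega
    rw [PySem.List.pyRange_one_cons (by omega : s < (cs.length : Int))]
    simp only [fsp_loop]
    by_cases hps : pvAt cs s ∉ pvVowels ∧ pvAt cs (s + 1) ∈ pvVowels
    · refine ⟨s, hs0, ?_⟩
      rw [if_pos ⟨by omega, by simpa using hps.2⟩, if_pos (by simpa using hps.1),
        fsp_count_one cs (cs.length : Int) s (by omega) hps.1 hps.2]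
      norm_num
    · have hi' : s + 1 ≤ i := by
        rcases eq_or_lt_of_le h1 with rfl | hlt
        · exact absurd ⟨hci, hvi⟩ hps
        · omega
      have hrec := ih (s + 1) (by omega) (by omega) ⟨i, hi', h2, hci, hvi⟩
      by_cases hv : pvAt cs (s + 1) ∈ pvVowels
      · have hcv : pvAt cs s ∈ pvVowels := by
          by_contra hcc; exact hps ⟨hcc, hv⟩
        rw [if_pos ⟨by omega, by simpa using hv⟩, if_neg (by simpa using hcv)]
        exact hrec
      · rw [if_neg (by intro h'; exact absurd (by simpa using h'.2) hv)]
        exact hrec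

-- ===== VERDICT (by name: the statement is the Claim_ definition above) =====
theorem find_split_position_spec : Claim_unchanged_find_split_position := by
  intro word vp _ hpre hnd
  show find_split_position word vp = find_split_position_alt word vp
  show fsp_loop word.toList (word.toList.length : Int)
        (PySem.List.pyRange (vp + 1) (word.toList.length : Int) 1)
      = fsp_search word.toList
        (PySem.List.pyRange (max (vp + 1) 0) ((word.toList.length : Int) - 1) 1)
  by_cases hpos : 0 ≤ vp + 1
  · rw [max_eq_left (by omega)]
    exact fsp_main word.toList (vp + 1) hpos
  · have hvp2 : vp ≤ -2 := by omega
    have hne : ∀ i : Int, max (vp + 1) (-(word.toList.length : Int)) ≤ i → i < 0 →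
        ¬ (pvAt word.toList i ∉ pvVowels ∧ pvAt word.toList (i + 1) ∈ pvVowels) := by
      intro i h1 h2 hP
      exact hnd ⟨hvp2, i, PySem.List.mem_pyRange_one.mpr ⟨h1, h2⟩, hP.1, hP.2⟩
    rcases hpre with hpre | ⟨hpre, hhead⟩
    · have hn1 : (1 : Int) ≤ (word.toList.length : Int) := by omega
      rw [max_eq_right (by omega)]
      rw [fsp_skip word.toList (vp + 1) (by omega) hn1
            (fun i h1 h2 => hne i (max_le h1 (by omega)) h2)]
      exact fsp_main word.toList 0 le_rfl
    · by_cases hn0 : word.toList.length = 0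
      · have hL : (word.toList.length : Int) = 0 := by exact_mod_cast congrArg Nat.cast hn0
        rw [hL] at hpre ⊢
        rw [show vp + 1 = -1 by omega]
        rw [PySem.List.pyRange_one_cons (show (-1 : Int) < 0 by norm_num)]
        simp only [fsp_loop]
        rw [if_neg (by rintro ⟨h, -⟩; omega)]
        rw [PySem.List.pyRange_one_eq_nil (show (0 : Int) ≤ -1 + 1 by norm_num)]
        rw [max_eq_right (by omega), PySem.List.pyRange_one_eq_nil (show (0 : Int) - 1 ≤ 0 by norm_num)]
        rfl
      · have hn1 : (1 : Int) ≤ (word.toList.length : Int) := by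
          have := Nat.pos_of_ne_zero hn0; omega
        have hat : pvAt word.toList (-(word.toList.length : Int) - 1 + 1)
            = word.toList.head?.getD '?' := by
          rw [show -(word.toList.length : Int) - 1 + 1 = -((word.toList.length : Nat) : Int) by ring]
          rw [pvAt, PySem.List.pyGet?_neg_natCast word.toList word.toList.length
                (Nat.pos_of_ne_zero hn0) le_rfl]
          rw [Nat.sub_self, List.head?_eq_getElem?]
        rw [show vp + 1 = -(word.toList.length : Int) - 1 by omega]
        rw [PySem.List.pyRange_one_cons (by omega)]
        simp only [fsp_loop]
        rw [if_neg ?hskip]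
        case hskip =>
          intro h
          have h2' : (['a', 'e', 'i', 'o', 'u'] : List Char).contains
              (word.toList.head?.getD '?') = true := hat ▸ h.2
          exact absurd (hhead.symm.trans h2') (by decide)
        rw [show -(word.toList.length : Int) - 1 + 1 = -(word.toList.length : Int) by ring]
        rw [fsp_skip word.toList (-(word.toList.length : Int)) (by omega) hn1
              (fun i h1 h2 => hne i (max_le (by omega) h1) h2)]
        rw [max_eq_right (by omega)]
        exact fsp_main word.toList 0 le_rfl

theorem find_split_position_changed : Claim_changed_find_split_position := by
  unfold Claim_changed_find_split_position; decide

theorem find_split_position_tight : Claim_exact_find_split_position := by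
  intro word vp _ hpre hD
  obtain ⟨hvp2, i, hmem, hci, hvi⟩ := hD
  obtain ⟨hi1, hi2⟩ := PySem.List.mem_pyRange_one.mp hmem
  have hmaxL := le_max_right (vp + 1) (-(word.toList.length : Int))
  have hmaxl := le_max_left (vp + 1) (-(word.toList.length : Int))
  have hL : 1 ≤ (word.toList.length : Int) := by omega
  obtain ⟨j, hj, hAj⟩ := fsp_loop_neg word.toList hL (-(vp + 1)).toNat (vp + 1)
    (by omega) (by omega) ⟨i, by omega, hi2, hci, hvi⟩
  intro heq
  have hA : find_split_position word vp = some j := hAj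
  rw [heq] at hA
  have hA' : fsp_search word.toList
      (PySem.List.pyRange (max (vp + 1) 0) ((word.toList.length : Int) - 1) 1) = some j := hA
  have hjmem := PySem.List.mem_pyRange_one.mp (fsp_search_mem word.toList _ j hA')
  have := le_max_right (vp + 1) (0 : Int)
  omega
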